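-- pv_equiv track=rewrite | github.com/luiscampovrivera-lab/clase4 | proyecto fundamentos 1234.py | validar_numero
-- ===== SOURCE A (Python) =====
-- val_pin_num = "1234567890-"                                #esta variable nos sirve para validar que el ingresado pin sean numeros
--
-- def validar_numero(num):                                                 #esta funcion valida si el valor cargado en el parametro num tiene solo numeros
--     m = False
--     mm = False
--     c = 0                                                                #se crea una variable local c = 0
--     for i in range(len(num)):
--         for n in range(11):
--             if num[i] == val_pin_num[n]:                  #compara los caracteres de la variable num y una variable string con los numeros 0 al 9
--                 c += 1                                 #cuenta los caracteres coincidentes entre los valores de num y val_pin_num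
--             if i == 0:
--                 if num[i] == "-":
--                     m = True
--             else:
--                 if num[i] == "-":
--                     mm = True
--     return c, m, mm                    #retorna el valor entero guardado en la variable c, m un signo menos y mm dos signos menos
-- ===== SOURCE B (Python) =====
-- val_pin_num = "1234567890-"
--
-- def validar_numero(num):
--     cs = list(num)
--     c = sum(cs.count(ch) for ch in val_pin_num)
--     m = num.startswith("-")
--     mm = "-" in num[1:]
--     return c, m, mm
-- ===== Notes on version B (the rewrite author's own statement) =====
-- stated objective: alternative
-- what changed: Transposes the traversal: instead of scanning the input and testing each character against the 11-symbol alphabet in an unrolled inner loop, B loops over the alphabet and counts each symbol's occurrences in the whole input with list.count, and derives the two flags with startswith and a substring test on the tail slice.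
import Mathlib
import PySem

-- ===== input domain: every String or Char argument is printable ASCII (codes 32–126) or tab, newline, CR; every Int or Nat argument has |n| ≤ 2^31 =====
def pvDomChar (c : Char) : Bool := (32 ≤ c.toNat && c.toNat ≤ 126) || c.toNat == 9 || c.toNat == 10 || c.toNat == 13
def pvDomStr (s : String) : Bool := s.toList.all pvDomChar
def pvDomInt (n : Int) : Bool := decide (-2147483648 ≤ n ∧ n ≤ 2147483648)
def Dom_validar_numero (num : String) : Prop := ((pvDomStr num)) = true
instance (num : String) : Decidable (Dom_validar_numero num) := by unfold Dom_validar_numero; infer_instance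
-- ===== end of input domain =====

-- B transposes the traversal: it loops over the 11-symbol alphabet counting each symbol in the input,
-- and gets the flags via startswith and a substring test on the tail slice; an alternative of the same cost.

-- ===== PORT A =====
-- module constant val_pin_num = "1234567890-" (as its character list)
def pvValPinNum : List Char := ['1','2','3','4','5','6','7','8','9','0','-']

-- inner 'for n in range(11)' body, exactly A's updates in order
def pvInnerA (i : Nat) (ch : Char) (st : Int × Bool × Bool) : Int × Bool × Bool :=
  (PySem.List.pyRange 0 11 1).foldl
    (fun st2 n =>
      let c := if ch = PySem.List.pyGetD pvValPinNum n ' ' then st2.1 + 1 else st2.1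
      if i = 0 then (c, (if ch = '-' then true else st2.2.1), st2.2.2)
      else (c, st2.2.1, (if ch = '-' then true else st2.2.2)))
    st

-- outer 'for i in range(len(num))' loop, walking the chars with their index
def pvLoopA : List Char → Nat → (Int × Bool × Bool) → (Int × Bool × Bool)
  | [], _, st => st
  | ch :: rest, i, st => pvLoopA rest (i + 1) (pvInnerA i ch st)

def validar_numero (num : String) : Int × Bool × Bool :=
  pvLoopA num.toList 0 (0, false, false)

-- ===== PORT B =====
def validar_numero_alt (num : String) : Int × Bool × Bool :=
  let cs := num.toList
  -- c = sum(cs.count(ch) for ch in val_pin_num): loop over the alphabet, count each symbol in num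
  let c : Int := pvValPinNum.foldl (fun acc ch => acc + (PySem.List.count cs ch : Int)) 0
  let m : Bool := PySem.Str.startswith num "-"
  let mm : Bool := PySem.Str.isIn "-" (String.ofList (PySem.List.slice cs (some 1) none))
  (c, m, mm)

-- ===== PRECONDITION & SPEC =====
def Spec_validar_numero (num : String) (out : Int × Bool × Bool) : Prop := out = validar_numero_alt num
instance (num : String) (out : Int × Bool × Bool) : Decidable (Spec_validar_numero num out) := by unfold Spec_validar_numero; infer_instance

-- ===== CLAIM =====
def Claim_equal_validar_numero : Prop := ∀ (num : String), Dom_validar_numero num → Spec_validar_numero num (validar_numero num)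

-- ===== LEMMAS AND PROOFS =====
-- A's inner 11-step scan in closed form: +1 iff ch is an alphabet symbol, flag update by position
theorem pvInnerA_closed (i : Nat) (ch : Char) (c : Int) (m mm : Bool) :
    pvInnerA i ch (c, m, mm) =
      (c + (if ch ∈ pvValPinNum then 1 else 0),
       if i = 0 then (m || decide (ch = '-')) else m,
       if i = 0 then mm else (mm || decide (ch = '-'))) := by
  by_cases hd : ch ∈ pvValPinNum
  · by_cases hi : i = 0 <;>
    · fin_cases hd <;>
        simp [pvInnerA, hi, PySem.List.pyRange, pvValPinNum, PySem.List.pyGetD,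
          PySem.List.pyGet?, PySem.List.pyIdx?, List.range_succ]
  · have hm : ch ≠ '-' := fun h => hd (by rw [h]; decide)
    simp only [pvValPinNum, List.mem_cons, not_or] at hd
    obtain ⟨h1, h2, h3, h4, h5, h6, h7, h8, h9, h0, -⟩ := hd
    by_cases hi : i = 0 <;>
      simp [pvInnerA, hi, pvValPinNum, PySem.List.pyRange, PySem.List.pyGetD,
        PySem.List.pyGet?, PySem.List.pyIdx?, List.range_succ, h1, h2, h3, h4, h5, h6, h7, h8, h9, h0, hm]

-- A's outer loop (from a nonzero index) in closed form
theorem pvLoopA_closed (cs : List Char) (i : Nat) (hi : i ≠ 0) (c : Int) (m mm : Bool) :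
    pvLoopA cs i (c, m, mm) =
      (c + (cs.countP (fun ch => ch ∈ pvValPinNum) : Int),
       m, mm || cs.any (fun ch => ch = '-')) := by
  induction cs generalizing i c mm with
  | nil => simp [pvLoopA]
  | cons ch rest ih =>
    simp only [pvLoopA, pvInnerA_closed, if_neg hi, List.countP_cons, List.any_cons]
    rw [ih (i + 1) (by omega)]
    by_cases h : ch ∈ pvValPinNum <;> simp [h, Bool.or_assoc] <;> push_cast <;> ring

-- splitting a membership count at the head of a duplicate-free alphabet
theorem pvCount_split (x : Char) (rest cs : List Char) (hx : x ∉ rest) :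
    cs.countP (fun ch => ch ∈ x :: rest) = cs.count x + cs.countP (fun ch => ch ∈ rest) := by
  induction cs with
  | nil => simp
  | cons ch cs ih =>
    simp only [List.countP_cons, List.count_cons, ih]
    by_cases h1 : ch = x
    · subst h1; simp [hx]; omega
    · by_cases h2 : ch ∈ rest <;> simp [h1, h2] <;> omega

-- transposition: summing per-symbol counts over a duplicate-free alphabet = counting membership
theorem pvSumCounts (alpha : List Char) (cs : List Char) (h : alpha.Nodup) (a : Int) :
    alpha.foldl (fun acc ch => acc + (cs.count ch : Int)) a
      = a + (cs.countP (fun ch => ch ∈ alpha) : Int) := by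
  induction alpha generalizing a with
  | nil => simp
  | cons x rest ih =>
    have hx : x ∉ rest := (List.nodup_cons.mp h).1
    simp only [List.foldl_cons]
    rw [ih (List.nodup_cons.mp h).2, pvCount_split x rest cs hx]
    push_cast; ring

-- '-' in a string built from a char list = list membership test
theorem pvIsIn_dash (l : List Char) :
    PySem.Str.isIn "-" (String.ofList l) = l.any (fun ch => ch = '-') := by
  have hd : ("-" : String).toList = ['-'] := by decide
  rw [Bool.eq_iff_iff, PySem.Str.isIn_iff_infix, hd, String.toList_ofList]
  constructor
  · intro hinf
    have hm : '-' ∈ l := hinf.mem (List.mem_singleton_self _)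
    exact List.any_eq_true.mpr ⟨'-', hm, by simp⟩
  · intro hany
    obtain ⟨x, hx, he⟩ := List.any_eq_true.mp hany
    have hx' : '-' ∈ l := by simpa using (of_decide_eq_true he) ▸ hx
    obtain ⟨s, t, hst⟩ := List.append_of_mem hx'
    exact ⟨s, t, by rw [hst]; simp⟩

-- ===== VERDICT =====
theorem validar_numero_spec : Claim_equal_validar_numero := by
  intro num _
  unfold Spec_validar_numero validar_numero validar_numero_alt
  dsimp only
  simp only [PySem.List.count_eq]
  rw [pvSumCounts pvValPinNum num.toList (by decide) 0, pvIsIn_dash, PySem.List.slice_from_one]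
  cases h : num.toList with
  | nil =>
    have hsw : PySem.Chars.startswith num.toList ['-'] = false := by
      rw [Bool.eq_iff_iff, PySem.Chars.startswith_iff, h]; simp
    simp [pvLoopA, hsw]
  | cons ch rest =>
    have hsw : PySem.Chars.startswith num.toList ['-'] = decide (ch = '-') := by
      rw [Bool.eq_iff_iff, PySem.Chars.startswith_iff, h]
      simp [List.cons_prefix_cons, eq_comm]
    simp only [pvLoopA, pvInnerA_closed, if_pos rfl]
    rw [pvLoopA_closed rest 1 (by omega)]
    simp [hsw, List.countP_cons]
    by_cases hc : ch ∈ pvValPinNum <;> simp [hc] <;> push_cast <;> ring
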